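-- pv_equiv track=rewrite | github.com/jATM0S/rubixx_be | solve/bottomCorners.py | leftCorner_piece_position
-- ===== SOURCE A (Python) =====
-- def leftCorner_piece_position(rubiks_cube,required_corner_pieces):
--     leftCorner_piece_position=[]
--     required_pieces=[]
--     for pair in required_corner_pieces:
--         for position in pair:  # Iterate over each position in the current pair
--             if rubiks_cube[position] == rubiks_cube['F5']:
--                 required_pieces.append(pair)
--
--     for piece in required_pieces:
--         for face in piece:
--             if rubiks_cube[face]==rubiks_cube['L5']:
--                 leftCorner_piece_position=piece
--     return leftCorner_piece_position
-- ===== SOURCE B (Python) =====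
-- def leftCorner_piece_position(rubiks_cube, required_corner_pieces):
--     result = []
--     for pair in required_corner_pieces:
--         colors = [rubiks_cube[face] for face in pair]
--         if any(c == rubiks_cube['F5'] for c in colors) and any(c == rubiks_cube['L5'] for c in colors):
--             result = pair
--     return result
-- ===== Notes on version B (the rewrite author's own statement) =====
-- stated objective: simpler
-- what changed: One pass over required_corner_pieces deciding per pair whether its colors contain both the F5 and the L5 color (last qualifying pair wins), replacing A's two-phase build of a duplicated intermediate list that is then rescanned; F5/L5 lookups happen lazily exactly where A performs them, so B returns wherever A returns.
import Mathlib
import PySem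

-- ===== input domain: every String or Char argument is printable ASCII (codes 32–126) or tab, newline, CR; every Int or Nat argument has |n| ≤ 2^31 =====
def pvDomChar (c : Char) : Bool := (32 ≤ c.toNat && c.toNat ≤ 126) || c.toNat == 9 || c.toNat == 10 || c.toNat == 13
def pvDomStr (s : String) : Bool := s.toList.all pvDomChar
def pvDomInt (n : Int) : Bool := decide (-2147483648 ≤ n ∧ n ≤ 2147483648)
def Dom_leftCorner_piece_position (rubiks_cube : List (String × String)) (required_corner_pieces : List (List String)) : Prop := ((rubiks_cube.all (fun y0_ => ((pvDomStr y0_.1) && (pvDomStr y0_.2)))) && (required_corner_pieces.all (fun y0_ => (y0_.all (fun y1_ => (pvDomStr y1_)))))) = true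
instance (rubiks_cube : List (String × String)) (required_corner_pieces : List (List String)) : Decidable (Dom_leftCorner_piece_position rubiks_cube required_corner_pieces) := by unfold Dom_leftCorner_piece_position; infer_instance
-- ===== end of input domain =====

-- B replaces A's two-phase scan (build a duplicated intermediate list, then rescan it) with one
-- pass testing each pair's colors for the F5 and L5 colors; objective: simpler. Return values equal on Pre_.

-- ===== PORT A =====
-- rubiks_cube[k] (KeyError = none, excluded by Pre_): first-match association-list lookup
def leftCorner_piece_position (rubiks_cube : List (String × String)) (required_corner_pieces : List (List String)) : List String :=
  let required_pieces :=
    required_corner_pieces.foldl (fun acc pair =>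
      pair.foldl (fun acc2 position =>
        if rubiks_cube.lookup position == rubiks_cube.lookup "F5" then acc2 ++ [pair] else acc2) acc) []
  required_pieces.foldl (fun res piece =>
    piece.foldl (fun r face =>
      if rubiks_cube.lookup face == rubiks_cube.lookup "L5" then piece else r) res) []

-- ===== PORT B =====
def leftCorner_piece_position_alt (rubiks_cube : List (String × String)) (required_corner_pieces : List (List String)) : List String :=
  required_corner_pieces.foldl (fun result pair =>
    let colors := pair.map (fun face => rubiks_cube.lookup face)
    if colors.any (fun c => c == rubiks_cube.lookup "F5")
       && colors.any (fun c => c == rubiks_cube.lookup "L5")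
    then pair else result) []

-- ===== PRECONDITION & SPEC =====
-- Pre_ is exactly the set of inputs on which the Python A returns (no KeyError): every listed face
-- is a key; 'F5' is a key if some pair is nonempty; 'L5' is a key if some face carries F5's color.
def Pre_leftCorner_piece_position (rubiks_cube : List (String × String)) (required_corner_pieces : List (List String)) : Prop :=
  (∀ pair ∈ required_corner_pieces, ∀ f ∈ pair, (rubiks_cube.lookup f).isSome) ∧
  ((∃ pair ∈ required_corner_pieces, pair ≠ []) → (rubiks_cube.lookup "F5").isSome) ∧
  ((∃ pair ∈ required_corner_pieces, ∃ f ∈ pair, rubiks_cube.lookup f = rubiks_cube.lookup "F5") →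
    (rubiks_cube.lookup "L5").isSome)
instance (rubiks_cube : List (String × String)) (required_corner_pieces : List (List String)) : Decidable (Pre_leftCorner_piece_position rubiks_cube required_corner_pieces) := by unfold Pre_leftCorner_piece_position; infer_instance
def pvWitness_leftCorner_piece_position : (List (String × String)) × List (List String) :=
  ([("F5", "g"), ("L5", "o"), ("a", "g"), ("b", "o")], [["a", "b"]])

def Spec_leftCorner_piece_position (rubiks_cube : List (String × String)) (required_corner_pieces : List (List String)) (out : List String) : Prop := out = leftCorner_piece_position_alt rubiks_cube required_corner_pieces
instance (rubiks_cube : List (String × String)) (required_corner_pieces : List (List String)) (out : List String) : Decidable (Spec_leftCorner_piece_position rubiks_cube required_corner_pieces out) := by unfold Spec_leftCorner_piece_position; infer_instance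

-- ===== CLAIM (what is proved, stated in full; the proofs are below) =====
def Claim_equal_leftCorner_piece_position : Prop := ∀ (rubiks_cube : List (String × String)) (required_corner_pieces : List (List String)), Dom_leftCorner_piece_position rubiks_cube required_corner_pieces → Pre_leftCorner_piece_position rubiks_cube required_corner_pieces → Spec_leftCorner_piece_position rubiks_cube required_corner_pieces (leftCorner_piece_position rubiks_cube required_corner_pieces)

-- ===== LEMMAS AND PROOFS =====

-- A's inner second-loop fold: 'if match then piece else r' over a list = any, last-wins.
theorem pv_const_fold {α β : Type} (P : α → Bool) (c : β) :
    ∀ (l : List α) (r : β),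
      l.foldl (fun r x => if P x then c else r) r = if l.any P then c else r := by
  intro l
  induction l with
  | nil => simp
  | cons a t ih =>
      intro r
      simp only [List.foldl_cons, List.any_cons, ih]
      by_cases h : P a = true
      · simp [h]
      · simp [h]

def pvStep (rubiks_cube : List (String × String)) (res : List String) (piece : List String) : List String :=
  if piece.any (fun f => rubiks_cube.lookup f == rubiks_cube.lookup "L5") then piece else res

-- second loop over the intermediate list = fold of pvStep
theorem pv_second_loop (rc : List (String × String)) :
    ∀ (l : List (List String)) (res : List String),
      l.foldl (fun res piece =>
        piece.foldl (fun r face => if rc.lookup face == rc.lookup "L5" then piece else r) res) res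
      = l.foldl (pvStep rc) res := by
  have hf : (fun (res piece : List String) =>
      piece.foldl (fun r face => if rc.lookup face == rc.lookup "L5" then piece else r) res)
      = pvStep rc := by
    funext res piece
    rw [pv_const_fold]
    rfl
  intro l res
  rw [hf]

-- pushing one pair's first-loop appends through the pvStep fold
theorem pv_inner_build (rc : List (String × String)) (pair : List String) :
    ∀ (l : List String) (acc : List (List String)),
      (l.foldl (fun a pos => if rc.lookup pos == rc.lookup "F5" then a ++ [pair] else a) acc).foldl (pvStep rc) []
      = if l.any (fun f => rc.lookup f == rc.lookup "F5")
           && pair.any (fun f => rc.lookup f == rc.lookup "L5")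
        then pair else acc.foldl (pvStep rc) [] := by
  intro l
  induction l with
  | nil => intro acc; simp
  | cons a t ih =>
      intro acc
      simp only [List.foldl_cons, List.any_cons]
      by_cases h : (rc.lookup a == rc.lookup "F5") = true
      · rw [if_pos h, ih, List.foldl_append]
        simp only [List.foldl_cons, List.foldl_nil, pvStep]
        by_cases hl : pair.any (fun f => rc.lookup f == rc.lookup "L5") = true <;> simp [h, hl]
      · rw [if_neg h, ih]
        simp [h]

-- main invariant: second loop applied to the first loop's accumulator
theorem pv_main (rc : List (String × String)) :
    ∀ (rcp : List (List String)) (acc : List (List String)),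
      (rcp.foldl (fun acc pair =>
          pair.foldl (fun a pos => if rc.lookup pos == rc.lookup "F5" then a ++ [pair] else a) acc) acc).foldl
        (pvStep rc) []
      = rcp.foldl (fun res pair =>
          if pair.any (fun f => rc.lookup f == rc.lookup "F5")
             && pair.any (fun f => rc.lookup f == rc.lookup "L5")
          then pair else res) (acc.foldl (pvStep rc) []) := by
  intro rcp
  induction rcp with
  | nil => intro acc; rfl
  | cons p t ih =>
      intro acc
      simp only [List.foldl_cons, ih, pv_inner_build]

-- ===== VERDICT (by name: the statement is the Claim_ definition above) =====
theorem leftCorner_piece_position_spec : Claim_equal_leftCorner_piece_position := by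
  intro rc rcp _ _
  unfold Spec_leftCorner_piece_position leftCorner_piece_position leftCorner_piece_position_alt
  rw [pv_second_loop, pv_main]
  simp only [List.foldl_nil]
  congr 1
  funext res pair
  simp only [List.any_map]
  rfl
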